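-- pv_equiv track=rewrite | github.com/carrilloangie/NYT | Documents/Organizado.py | PostingsLists
-- ===== SOURCE A (Python) =====
-- from collections import defaultdict
--
-- def PostingsLists(merged):
--     posting_lists = defaultdict(list)
--
--     for k,v in merged:
--         posting_lists[k].append(v)
--
--     posting_lists = dict(posting_lists)
--
--     #Sort postings lists (by termID and then by docID)
--     for k in posting_lists.keys():
--         posting_lists[k].sort()
--     posting_lists=dict(sorted(posting_lists.items()))
--
--     return posting_lists
-- ===== SOURCE B (Python) =====
-- def PostingsLists(merged):
--     # One sort of the pairs up front: tuple order makes keys ascending and,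
--     # within a key, values ascending, so a single grouping pass suffices.
--     result = {}
--     for k, v in sorted(merged):
--         result.setdefault(k, []).append(v)
--     return result
-- ===== Notes on version B (the rewrite author's own statement) =====
-- stated objective: simpler
-- what changed: B replaces A's build-groups-then-sort-each-group-then-sort-the-items pipeline by one lexicographic sort of the pairs followed by a single setdefault grouping pass (tuple order already yields key-sorted groups with sorted values).
import Mathlib
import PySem

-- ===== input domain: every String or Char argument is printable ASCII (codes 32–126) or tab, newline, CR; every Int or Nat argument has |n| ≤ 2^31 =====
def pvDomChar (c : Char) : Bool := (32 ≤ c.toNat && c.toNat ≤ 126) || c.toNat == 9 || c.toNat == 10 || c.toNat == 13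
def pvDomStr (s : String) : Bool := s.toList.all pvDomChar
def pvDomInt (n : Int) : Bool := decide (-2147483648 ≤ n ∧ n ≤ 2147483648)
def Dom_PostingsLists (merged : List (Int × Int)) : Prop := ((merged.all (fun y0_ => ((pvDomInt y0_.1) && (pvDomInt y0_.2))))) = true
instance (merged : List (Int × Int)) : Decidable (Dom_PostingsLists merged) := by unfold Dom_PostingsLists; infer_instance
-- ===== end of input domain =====

-- B groups after one lexicographic sort of the pairs instead of A's build-groups /
-- sort-each-group / sort-the-items pipeline; objective: simpler (same O(n log n) cost).

-- ===== PORT A =====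
def PostingsLists (merged : List (Int × Int)) : List (Int × List Int) :=
  -- posting_lists = defaultdict(list); for k, v in merged: posting_lists[k].append(v)
  let d := merged.foldl (fun d p => d.modify p.1 [] (fun vs => vs ++ [p.2])) PySem.Dict.empty
  -- for k in posting_lists.keys(): posting_lists[k].sort()   (in-place sort of the stored list)
  let d2 := d.keys.foldl (fun acc k => acc.modify k [] (fun vs => PySem.List.sorted vs (fun v => v) false)) d
  -- posting_lists = dict(sorted(posting_lists.items())); return posting_lists
  -- (dict keys are distinct, so Python's tuple comparison of items only ever compares
  --  the keys: sorting the items by their key is exact here)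
  (PySem.Dict.ofList (PySem.List.sorted d2.items (fun p => p.1) false)).items

-- ===== PORT B =====
def PostingsLists_alt (merged : List (Int × Int)) : List (Int × List Int) :=
  -- for k, v in sorted(merged): result.setdefault(k, []).append(v)
  -- (setdefault(k, []).append(v) sets result[k] to result.get(k, []) + [v] = Dict.modify)
  let s := PySem.List.sorted2 merged (fun p => p.1) (fun p => p.2) false
  (s.foldl (fun d p => d.modify p.1 [] (fun vs => vs ++ [p.2])) PySem.Dict.empty).items

-- ===== PRECONDITION & SPEC =====
def Spec_PostingsLists (merged : List (Int × Int)) (out : List (Int × List Int)) : Prop := out = PostingsLists_alt merged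
instance (merged : List (Int × Int)) (out : List (Int × List Int)) : Decidable (Spec_PostingsLists merged out) := by unfold Spec_PostingsLists; infer_instance

-- ===== CLAIM (what is proved, stated in full; the proofs are below) =====
def Claim_equal_PostingsLists : Prop := ∀ (merged : List (Int × Int)), Dom_PostingsLists merged → Spec_PostingsLists merged (PostingsLists merged)

-- ===== LEMMAS AND PROOFS =====

-- the canonical result both pipelines reach: key-sorted distinct keys, each with its sorted values
def pvCanon (merged : List (Int × Int)) : List (Int × List Int) :=
  (PySem.List.sorted (PySem.Set.ofList (merged.map (·.1))) (fun k => k) false).map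
    (fun k => (k, PySem.List.sorted ((merged.filter (fun p => p.1 == k)).map (·.2)) (fun v => v) false))

-- ofList keeps a subsequence (first occurrences) of its input
theorem pvFoldlAdd_sublist {α : Type} [BEq α] (xs s : List α) :
    ∃ t, List.foldl PySem.Set.add s xs = s ++ t ∧ t.Sublist xs := by
  induction xs generalizing s with
  | nil => exact ⟨[], by simp⟩
  | cons x xs ih =>
    simp only [List.foldl_cons]
    by_cases h : s.contains x
    · obtain ⟨t, ht, hs⟩ := ih s
      exact ⟨t, by simpa [PySem.Set.add, h] using ht, hs.cons x⟩
    · obtain ⟨t, ht, hs⟩ := ih (s ++ [x])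
      exact ⟨x :: t, by simpa [PySem.Set.add, h] using ht, hs.cons₂ x⟩

theorem pvOfList_sublist {α : Type} [BEq α] (xs : List α) :
    (PySem.Set.ofList xs).Sublist xs := by
  obtain ⟨t, ht, hs⟩ := pvFoldlAdd_sublist xs []
  simpa [PySem.Set.ofList, PySem.Set.empty, ht] using hs

-- dedup of a ≤-sorted Int list is <-sorted
theorem pvOfList_pairwise_lt (xs : List Int) (h : xs.Pairwise (· ≤ ·)) :
    (PySem.Set.ofList xs).Pairwise (· < ·) := by
  have h1 : (PySem.Set.ofList xs).Pairwise (· ≤ ·) := List.Pairwise.sublist (pvOfList_sublist xs) h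
  have h2 : (PySem.Set.ofList xs).Pairwise (· ≠ ·) := PySem.Set.nodup_ofList xs
  exact (h1.and h2).imp (fun ⟨hle, hne⟩ => lt_of_le_of_ne hle hne)

-- adding elements already present leaves a set unchanged
theorem pvFoldlAdd_of_subset {α : Type} [BEq α] [LawfulBEq α] (xs s : List α)
    (h : ∀ x ∈ xs, x ∈ s) : List.foldl PySem.Set.add s xs = s := by
  induction xs with
  | nil => rfl
  | cons x xs ih =>
    have hx : PySem.Set.contains s x = true := by
      simpa [PySem.Set.contains] using h x (by simp)
    simp only [List.foldl_cons, PySem.Set.add, hx, if_true]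
    exact ih fun y hy => h y (by simp [hy])

-- insertBy into a list pairwise-sorted by "not strictly after" stays sorted
theorem pvInsertBy_pairwise {α : Type} (before : α → α → Bool)
    (hasym : ∀ a b, before a b = true → before b a = false)
    (htrans : ∀ a b c, before a b = true → before b c = true → before a c = true)
    (x : α) (ys : List α) (h : ys.Pairwise (fun a b => before b a = false)) :
    (PySem.List.insertBy before x ys).Pairwise (fun a b => before b a = false) := by
  induction ys with
  | nil => simp [PySem.List.insertBy]
  | cons y ys ih =>
    rcases List.pairwise_cons.mp h with ⟨h1, h2⟩
    by_cases hb : before x y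
    · simp only [PySem.List.insertBy, hb, if_pos]
      refine List.pairwise_cons.mpr ⟨?_, h⟩
      intro z hz
      rcases List.mem_cons.mp hz with hz | hz
      · exact hz ▸ hasym x y hb
      · by_contra hc
        have hzx : before z x = true := by simpa using hc
        have : before z y = true := htrans z x y hzx hb
        simp [h1 z hz] at this
    · simp only [PySem.List.insertBy, hb, if_neg, Bool.false_eq_true, not_false_iff]
      refine List.pairwise_cons.mpr ⟨?_, ih h2⟩
      intro z hz
      rcases (PySem.List.mem_insertBy _ _ _ _).mp hz with hz | hz
      · subst hz; simpa using hb
      · exact h1 z hz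

theorem pvFoldlInsertBy_pairwise {α : Type} (before : α → α → Bool)
    (hasym : ∀ a b, before a b = true → before b a = false)
    (htrans : ∀ a b c, before a b = true → before b c = true → before a c = true)
    (xs acc : List α) (h : acc.Pairwise (fun a b => before b a = false)) :
    (xs.foldl (fun acc x => PySem.List.insertBy before x acc) acc).Pairwise
      (fun a b => before b a = false) := by
  induction xs generalizing acc with
  | nil => exact h
  | cons x xs ih => exact ih _ (pvInsertBy_pairwise before hasym htrans x acc h)

-- the sorted2 output of B is pairwise lexicographically ≤
theorem pvSorted2_pairwise (merged : List (Int × Int)) :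
    (PySem.List.sorted2 merged (fun p => p.1) (fun p => p.2) false).Pairwise
      (fun a b => a.1 < b.1 ∨ (a.1 = b.1 ∧ a.2 ≤ b.2)) := by
  have h := pvFoldlInsertBy_pairwise
    (fun a b : Int × Int => decide (a.1 < b.1) || (!decide (b.1 < a.1) && decide (a.2 < b.2)))
    (by intro a b hab; revert hab; simp; omega)
    (by intro a b c hab hbc; revert hab hbc; simp; omega)
    merged [] (by simp)
  refine (List.Pairwise.imp ?_ h)
  intro a b hab
  revert hab; simp; omega


-- grouping fold: keys are the distinct first components, values the per-key seconds
theorem pvKeysG (l : List (Int × Int)) :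
    (l.foldl (fun d p => d.modify p.1 [] (fun vs => vs ++ [p.2])) PySem.Dict.empty).keys
      = PySem.Set.ofList (l.map (·.1)) := by
  simp only [PySem.Dict.keys_foldl_modify_key]
  rfl

theorem pvGetDG (l : List (Int × Int)) (c : Int) :
    (l.foldl (fun d p => d.modify p.1 [] (fun vs => vs ++ [p.2])) PySem.Dict.empty).getD c []
      = (l.filter (fun p => p.1 == c)).map (·.2) := by
  simp only [PySem.Dict.getD_foldl_modify_append]
  rfl

-- A's per-key sorting loop, on a duplicate-free key list
theorem pvGetD_foldl_sortvals (ks : List Int) (d : PySem.Dict Int (List Int)) (hnd : ks.Nodup) (c : Int) :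
    (ks.foldl (fun acc k => acc.modify k [] (fun vs => PySem.List.sorted vs (fun v => v) false)) d).getD c []
      = if c ∈ ks then PySem.List.sorted (d.getD c []) (fun v => v) false else d.getD c [] := by
  induction ks generalizing d with
  | nil => simp
  | cons k ks ih =>
    rcases List.nodup_cons.mp hnd with ⟨hk, hnd'⟩
    simp only [List.foldl_cons]
    rw [ih _ hnd']
    by_cases hc : c = k
    · subst hc
      simp [hk, PySem.Dict.getD_modify_self]
    · rw [PySem.Dict.getD_modify_of_ne _ _ _ hc]
      simp [List.mem_cons, hc]

theorem pvA_eq_canon (merged : List (Int × Int)) : PostingsLists merged = pvCanon merged := by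
  simp only [PostingsLists]
  set d := merged.foldl (fun d p => d.modify p.1 [] (fun vs => vs ++ [p.2])) PySem.Dict.empty with hd
  set d2 := d.keys.foldl (fun acc k => acc.modify k [] (fun vs => PySem.List.sorted vs (fun v => v) false)) d with hd2
  have hkeys : d.keys = PySem.Set.ofList (merged.map (·.1)) := pvKeysG merged
  have hndk : d.keys.Nodup := by rw [hkeys]; exact PySem.Set.nodup_ofList _
  have hkeys2 : d2.keys = d.keys := by
    rw [hd2, PySem.Dict.keys_foldl_modify_key]
    show List.foldl PySem.Set.add d.keys (d.keys.map fun x => x) = d.keys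
    rw [List.map_id']
    exact pvFoldlAdd_of_subset _ _ (fun x hx => hx)
  have hitems : d2.items = d.keys.map (fun k => (k, d2.getD k [])) := by
    rw [PySem.Dict.items_eq_map_keys d2 (hkeys2 ▸ hndk) [], hkeys2]
  have hvals : ∀ k ∈ d.keys, d2.getD k []
      = PySem.List.sorted ((merged.filter (fun p => p.1 == k)).map (·.2)) (fun v => v) false := by
    intro k hk
    rw [hd2, pvGetD_foldl_sortvals _ _ hndk, if_pos hk, hd, pvGetDG]
  have hitems' : d2.items = d.keys.map (fun k =>
      (k, PySem.List.sorted ((merged.filter (fun p => p.1 == k)).map (·.2)) (fun v => v) false)) := by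
    rw [hitems]; exact List.map_congr_left (fun k hk => by rw [hvals k hk])
  have hKlt : (PySem.List.sorted (PySem.Set.ofList (merged.map (·.1))) (fun k => k) false).Pairwise (· < ·) :=
    PySem.List.sorted_ofList_pairwise_lt _
  have hsorted : PySem.List.sorted d2.items (fun p => p.1) false = pvCanon merged := by
    apply PySem.List.sorted_eq_of_perm_of_pairwise_lt
    · unfold pvCanon
      rw [hitems']
      exact List.Perm.map _ ((PySem.List.sorted_perm _ _ false).trans (hkeys ▸ List.Perm.refl _))
    · unfold pvCanon
      rw [List.pairwise_map]
      exact hKlt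
  rw [hsorted]
  have hfst : (pvCanon merged).map (·.1)
      = PySem.List.sorted (PySem.Set.ofList (merged.map (·.1))) (fun k => k) false := by
    unfold pvCanon; rw [List.map_map]; exact List.map_id' _
  show ((PySem.Dict.empty : PySem.Dict Int (List Int)).update (pvCanon merged)).items = pvCanon merged
  rw [PySem.Dict.update]
  rw [PySem.Dict.items_foldl_insert_fresh (pvCanon merged) (·.1) (·.2) PySem.Dict.empty
      (fun a _ => PySem.Dict.contains_empty _)
      (by rw [hfst]; exact (hKlt.imp ne_of_lt))]
  simp [PySem.Dict.empty]

theorem pvB_eq_canon (merged : List (Int × Int)) : PostingsLists_alt merged = pvCanon merged := by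
  simp only [PostingsLists_alt]
  set s := PySem.List.sorted2 merged (fun p => p.1) (fun p => p.2) false with hs
  have hperm : s.Perm merged := PySem.List.sorted2_perm merged _ _ false
  have hlex := pvSorted2_pairwise merged
  rw [← hs] at hlex
  have hnd : (s.foldl (fun d p => d.modify p.1 [] (fun vs => vs ++ [p.2])) PySem.Dict.empty).keys.Nodup := by
    rw [pvKeysG]; exact PySem.Set.nodup_ofList _
  rw [PySem.Dict.items_eq_map_keys _ hnd [], pvKeysG]
  have hK : PySem.List.sorted (PySem.Set.ofList (merged.map (·.1))) (fun k => k) false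
      = PySem.Set.ofList (s.map (·.1)) := by
    apply PySem.List.sorted_eq_of_perm_of_pairwise_lt
    · rw [List.perm_ext_iff_of_nodup (PySem.Set.nodup_ofList _) (PySem.Set.nodup_ofList _)]
      intro a
      rw [PySem.Set.mem_ofList, PySem.Set.mem_ofList]
      exact (hperm.map (·.1)).mem_iff
    · exact pvOfList_pairwise_lt _ (List.pairwise_map.mpr (hlex.imp (by intro a b hab; omega)))
  unfold pvCanon
  rw [hK]
  apply List.map_congr_left
  intro k _
  rw [pvGetDG]
  congr 1
  symm
  apply PySem.List.sorted_id_eq_of_perm_of_pairwise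
  · exact ((hperm.filter _).map _)
  · rw [List.pairwise_map]
    refine List.Pairwise.imp_of_mem ?_ ((hlex.filter _))
    intro a b ha hb hab
    have ha' : a.1 = k := by simpa using (List.mem_filter.mp ha).2
    have hb' : b.1 = k := by simpa using (List.mem_filter.mp hb).2
    omega

-- ===== VERDICT (by name: the statement is the Claim_ definition above) =====
theorem PostingsLists_spec : Claim_equal_PostingsLists := by
  intro merged _
  unfold Spec_PostingsLists
  rw [pvA_eq_canon, pvB_eq_canon]
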